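-- pv_equiv track=rewrite | github.com/chabirOael/tokenizers_evaluation | src/arabic_eval/data/answer_only_masking.py | compute_answer_only_labels
-- ===== SOURCE A (Python) =====
-- from typing import List, Optional, Sequence
--
-- def compute_answer_only_labels(
--     prompt_ids: Sequence[int],
--     full_ids: Sequence[int],
-- ) -> Optional[List[int]]:
--     """Return labels for ``full_ids`` with prompt span masked to -100.
--
--     Computes the longest common prefix length ``lcp`` between
--     ``prompt_ids`` and ``full_ids``, then returns
--     ``[-100] * lcp + full_ids[lcp:]``.
--
--     Returns ``None`` if ``lcp >= len(full_ids)`` — meaning truncation cut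
--     the answer span entirely; the example should be skipped (zero gradient
--     contribution otherwise).
--     """
--     lcp = 0
--     for a, b in zip(prompt_ids, full_ids):
--         if a != b:
--             break
--         lcp += 1
--     full_len = len(full_ids)
--     if lcp >= full_len:
--         return None
--     labels = list(full_ids)
--     for i in range(lcp):
--         labels[i] = -100
--     return labels
-- ===== SOURCE B (Python) =====
-- def compute_answer_only_labels(prompt_ids, full_ids):
--     """Single fused pass: emit -100 while still matching the prompt prefix,
--     copy tokens after the first mismatch; None if everything was masked."""
--     labels = []
--     rest = list(prompt_ids)
--     masking = True
--     for tok in full_ids: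
--         if masking and rest and rest[0] == tok:
--             labels.append(-100)
--             rest = rest[1:]
--         else:
--             masking = False
--             labels.append(tok)
--     return None if masking else labels
-- ===== Notes on version B (the rewrite author's own statement) =====
-- stated objective: alternative
-- what changed: Replaces the two-pass version (count the longest common prefix with zip, then copy full_ids and overwrite a range of the copy) by a single fused scan over full_ids that consumes prompt_ids and builds the labels list directly, deciding None from a masking flag instead of an lcp/length comparison.
import Mathlib
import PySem

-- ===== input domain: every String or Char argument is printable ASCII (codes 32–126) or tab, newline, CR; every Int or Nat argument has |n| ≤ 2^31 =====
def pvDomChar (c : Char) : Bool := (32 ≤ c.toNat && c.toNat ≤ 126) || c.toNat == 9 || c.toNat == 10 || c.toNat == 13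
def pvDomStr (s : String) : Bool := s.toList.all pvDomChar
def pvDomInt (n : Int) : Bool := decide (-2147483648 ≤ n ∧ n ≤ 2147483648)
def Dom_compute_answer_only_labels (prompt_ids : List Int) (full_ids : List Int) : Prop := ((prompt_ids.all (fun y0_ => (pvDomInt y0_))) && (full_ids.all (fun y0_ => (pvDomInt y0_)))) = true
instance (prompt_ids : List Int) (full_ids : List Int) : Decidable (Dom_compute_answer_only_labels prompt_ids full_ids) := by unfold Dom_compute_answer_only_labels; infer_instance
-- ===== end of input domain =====

-- B replaces A's two passes (zip-count the common prefix, then overwrite a copy) by one fused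
-- scan of full_ids that consumes prompt_ids and builds the labels directly (alternative decomposition).


-- ===== PORT A =====
-- 'for a, b in zip(prompt_ids, full_ids): if a != b: break; lcp += 1'
def pvLcpA : List Int → List Int → Nat
  | a :: as, b :: bs => if a ≠ b then 0 else pvLcpA as bs + 1
  | _, _ => 0

def compute_answer_only_labels (prompt_ids : List Int) (full_ids : List Int) : Option (List Int) :=
  let lcp := pvLcpA prompt_ids full_ids
  let full_len := full_ids.length
  if full_len ≤ lcp then none
  else
    -- labels = list(full_ids); for i in range(lcp): labels[i] = -100
    some ((PySem.List.pyRange 0 (lcp : Int) 1).foldl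
      (fun labels i => labels.set i.toNat (-100)) full_ids)

-- ===== PORT B =====
-- the fused loop of Source B: returns (labels, masking) after scanning full_ids
def pvLoopB : List Int → List Int → Bool → List Int × Bool
  | _, [], m => ([], m)
  | [], tok :: fs, _ =>
      let r := pvLoopB [] fs false
      (tok :: r.1, r.2)
  | a :: ps, tok :: fs, m =>
      if m && (a == tok) then
        let r := pvLoopB ps fs true
        ((-100) :: r.1, r.2)
      else
        let r := pvLoopB (a :: ps) fs false
        (tok :: r.1, r.2)

def compute_answer_only_labels_alt (prompt_ids : List Int) (full_ids : List Int) : Option (List Int) :=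
  let r := pvLoopB prompt_ids full_ids true
  if r.2 then none else some r.1

-- ===== PRECONDITION & SPEC =====
def Spec_compute_answer_only_labels (prompt_ids : List Int) (full_ids : List Int) (out : Option (List Int)) : Prop := out = compute_answer_only_labels_alt prompt_ids full_ids
instance (prompt_ids : List Int) (full_ids : List Int) (out : Option (List Int)) : Decidable (Spec_compute_answer_only_labels prompt_ids full_ids out) := by unfold Spec_compute_answer_only_labels; infer_instance

-- ===== CLAIM (what is proved, stated in full; the proofs are below) =====
def Claim_equal_compute_answer_only_labels : Prop := ∀ (prompt_ids : List Int) (full_ids : List Int), Dom_compute_answer_only_labels prompt_ids full_ids → Spec_compute_answer_only_labels prompt_ids full_ids (compute_answer_only_labels prompt_ids full_ids)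

-- ===== LEMMAS AND PROOFS =====

theorem pvLcpA_le (p f : List Int) : pvLcpA p f ≤ f.length := by
  induction f generalizing p with
  | nil => cases p <;> simp [pvLcpA]
  | cons b bs ih =>
    cases p with
    | nil => simp [pvLcpA]
    | cons a as =>
      simp only [pvLcpA]
      split
      · simp
      · simpa using Nat.succ_le_succ (ih as)

-- once masking is off, the loop just copies the remaining tokens
theorem pvLoopB_false (p f : List Int) : pvLoopB p f false = (f, false) := by
  induction f generalizing p with
  | nil => cases p <;> simp [pvLoopB]
  | cons tok fs ih =>
    cases p with
    | nil => simp [pvLoopB, ih]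
    | cons a as => simp [pvLoopB, ih]

-- characterisation of the fused loop by the lcp
theorem pvLoopB_true (p f : List Int) :
    pvLoopB p f true =
      (List.replicate (pvLcpA p f) (-100) ++ f.drop (pvLcpA p f),
       decide (f.length = pvLcpA p f)) := by
  induction f generalizing p with
  | nil => cases p <;> simp [pvLoopB, pvLcpA]
  | cons tok fs ih =>
    cases p with
    | nil => simp [pvLoopB, pvLcpA, pvLoopB_false]
    | cons a as =>
      by_cases h : a = tok
      · subst h
        simp [pvLoopB, pvLcpA, ih, List.replicate_succ]
      · simp [pvLoopB, pvLcpA, h, pvLoopB_false]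

-- A's overwrite loop produces replicate ++ drop
theorem pvSetLoop (lcp : Nat) (f : List Int) (h : lcp ≤ f.length) :
    (PySem.List.pyRange 0 (lcp : Int) 1).foldl
      (fun labels i => labels.set i.toNat (-100)) f
    = List.replicate lcp (-100) ++ f.drop lcp := by
  induction lcp with
  | zero => simp [PySem.List.pyRange]
  | succ k ih =>
    have hk : k ≤ f.length := Nat.le_of_succ_le h
    have hrange : PySem.List.pyRange 0 ((k + 1 : Nat) : Int) 1
        = PySem.List.pyRange 0 (k : Int) 1 ++ [(k : Int)] := by
      have := PySem.List.pyRange_one_succ_right (a := (0 : Int)) (b := (k : Int)) (by positivity)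
      simpa [add_comm] using this
    rw [show ((Nat.succ k : Nat) : Int) = ((k + 1 : Nat) : Int) by norm_num, hrange,
      List.foldl_append, ih hk]
    simp only [List.foldl_cons, List.foldl_nil, Int.toNat_natCast]
    have hklt : k < f.length := h
    have hdrop : f.drop k = f[k] :: f.drop (k + 1) := (List.drop_eq_getElem_cons hklt)
    rw [hdrop]
    rw [List.set_append_right _ _ (by simp)]
    simp [List.replicate_succ' (n := k), List.append_assoc]
    rw [hdrop]
    rfl

-- ===== VERDICT (by name: the statement is the Claim_ definition above) =====
theorem compute_answer_only_labels_spec : Claim_equal_compute_answer_only_labels := by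
  intro p f _
  unfold Spec_compute_answer_only_labels compute_answer_only_labels compute_answer_only_labels_alt
  rw [pvLoopB_true]
  have hle := pvLcpA_le p f
  by_cases h : f.length ≤ pvLcpA p f
  · have : f.length = pvLcpA p f := le_antisymm h hle
    simp [this]
  · have hne : ¬ (f.length = pvLcpA p f) := by omega
    simp only [h, hne, if_false, decide_false, Bool.false_eq_true]
    rw [pvSetLoop _ _ hle]
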